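-- pv_equiv track=rewrite | github.com/Nakatsuka12162/Nakatsuka12162-net-houjin-data-ai-refiner | research/scraper.py | unique_title
-- ===== SOURCE A (Python) =====
-- def unique_title(base: str, existing_titles):
--     safe = (base or "Company")[:100]
--     if safe not in existing_titles:
--         return safe
--     idx = 2
--     while True:
--         cand = f"{safe}_{idx}"
--         if cand not in existing_titles:
--             return cand
--         idx += 1
-- ===== SOURCE B (Python) =====
-- def _canon_num(rest):
--     """Value of rest if it is a canonical decimal numeral (digits only, no leading zero), else None."""
--     if not rest or (rest[0] == "0" and len(rest) > 1):
--         return None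
--     v = 0
--     for ch in rest:
--         if not ("0" <= ch <= "9"):
--             return None
--         v = 10 * v + ord(ch) - 48
--     return v
--
--
-- def unique_title(base: str, existing_titles):
--     safe = (base or "Company")[:100]
--     if safe not in existing_titles:
--         return safe
--     pre = safe + "_"
--     used = set()
--     for t in existing_titles:
--         if t.startswith(pre):
--             v = _canon_num(t[len(pre):])
--             if v is not None:
--                 used.add(v)
--     idx = 2
--     for v in sorted(used):
--         if v < idx:
--             continue
--         elif v == idx:
--             idx += 1
--         else:
--             break
--     return f"{safe}_{idx}"
-- ===== Notes on version B (the rewrite author's own statement) =====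
-- stated objective: alternative
-- what changed: B never probes candidate titles: one pass over the titles extracts the canonical numeric suffixes behind 'safe_' into a set of integers, and the answer's number is found by a first-gap scan over that set in sorted order, instead of A's unbounded increment-and-membership-probe loop.
import Mathlib
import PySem

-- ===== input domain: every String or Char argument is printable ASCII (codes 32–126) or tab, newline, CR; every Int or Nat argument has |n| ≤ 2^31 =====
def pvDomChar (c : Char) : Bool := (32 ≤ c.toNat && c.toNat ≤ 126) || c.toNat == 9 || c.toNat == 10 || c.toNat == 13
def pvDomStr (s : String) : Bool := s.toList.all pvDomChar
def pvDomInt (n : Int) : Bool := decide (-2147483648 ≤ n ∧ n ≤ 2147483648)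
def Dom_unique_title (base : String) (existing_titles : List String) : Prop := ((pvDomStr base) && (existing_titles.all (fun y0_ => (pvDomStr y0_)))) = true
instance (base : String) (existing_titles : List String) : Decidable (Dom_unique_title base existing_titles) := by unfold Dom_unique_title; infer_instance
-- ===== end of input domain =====

-- B replaces A's unbounded probe loop (try "safe_2", "safe_3", … against the title list) by a
-- single pass extracting the canonical numeric suffixes behind "safe_" into a set of integers
-- and a first-gap scan over that set in sorted order (objective: alternative).

-- ===== PORT A =====
-- A's 'while True' loop; the fuel argument only makes it total (existing_titles.length + 1
-- probes always reach a free candidate, so the fuel-0 fallback is unreachable in Python's runs).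
def uniqueTitleLoopA (safe : String) (ex : List String) : Nat → Int → String
  | 0, idx => safe ++ "_" ++ PySem.Int.toStr idx
  | fuel+1, idx =>
    let cand := safe ++ "_" ++ PySem.Int.toStr idx
    if cand ∈ ex then uniqueTitleLoopA safe ex fuel (idx + 1) else cand

def unique_title (base : String) (existing_titles : List String) : String :=
  let safe := String.ofList (PySem.List.slice (if base = "" then "Company" else base).toList none (some 100))
  if safe ∈ existing_titles then
    uniqueTitleLoopA safe existing_titles (existing_titles.length + 1) 2
  else safe

-- ===== PORT B =====
-- Source B's _canon_num digit loop: v = 10*v + ord(ch) - 48 while ch is a digit, else None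
-- (Source B's string indexing/iteration is ported through toList; exact on the ASCII domain)
def canonNumLoop : List Char → Int → Option Int
  | [], v => some v
  | c :: cs, v =>
    if '0' ≤ c ∧ c ≤ '9' then canonNumLoop cs (10 * v + (c.toNat : Int) - 48) else none

-- Source B's _canon_num guard: None on "" and on a leading zero (unless the string is exactly "0")
def canonNum? : List Char → Option Int
  | [] => none
  | c :: cs => if c = '0' ∧ cs ≠ [] then none else canonNumLoop (c :: cs) 0

-- the body of B's extraction pass for one title t: t.startswith(pre) and _canon_num(t[len(pre):])
def canonSuffix? (pre : List Char) (t : String) : Option Int :=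
  if PySem.Chars.startswith t.toList pre then
    canonNum? (PySem.List.slice t.toList (some (pre.length : Int)) none)
  else none

-- B's for-loop over the sorted used numbers: continue below idx, bump on a hit, break above
def gapScan : List Int → Int → Int
  | [], idx => idx
  | v :: vs, idx =>
    if v < idx then gapScan vs idx
    else if v = idx then gapScan vs (idx + 1)
    else idx

def unique_title_alt (base : String) (existing_titles : List String) : String :=
  let safe := String.ofList (PySem.List.slice (if base = "" then "Company" else base).toList none (some 100))
  if safe ∈ existing_titles then
    let pre := safe ++ "_"
    let used : PySem.Set Int := existing_titles.foldl (fun s t =>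
      match canonSuffix? pre.toList t with
      | some v => PySem.Set.add s v
      | none => s) PySem.Set.empty
    let idx := gapScan (PySem.List.sorted used (fun x => x)) 2
    safe ++ "_" ++ PySem.Int.toStr idx
  else safe

-- ===== PRECONDITION & SPEC =====
def Spec_unique_title (base : String) (existing_titles : List String) (out : String) : Prop := out = unique_title_alt base existing_titles
instance (base : String) (existing_titles : List String) (out : String) : Decidable (Spec_unique_title base existing_titles out) := by unfold Spec_unique_title; infer_instance

-- ===== CLAIM (what is proved, stated in full; the proofs are below) =====
def Claim_equal_unique_title : Prop := ∀ (base : String) (existing_titles : List String), Dom_unique_title base existing_titles → Spec_unique_title base existing_titles (unique_title base existing_titles)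

-- ===== LEMMAS AND PROOFS =====

-- digit-char facts
theorem digitChar_facts (d : Nat) (hd : d < 10) :
    '0' ≤ Nat.digitChar d ∧ Nat.digitChar d ≤ '9' ∧ (Nat.digitChar d).toNat = d + 48 := by
  interval_cases d <;> exact ⟨by decide, by decide, by decide⟩

theorem digitChar_of_char (c : Char) (h0 : '0' ≤ c) (h9 : c ≤ '9') :
    Nat.digitChar (c.toNat - 48) = c := by
  have h48 : 48 ≤ c.toNat := h0
  have h57 : c.toNat ≤ 57 := h9
  have hd : c.toNat = 48 ∨ c.toNat = 49 ∨ c.toNat = 50 ∨ c.toNat = 51 ∨ c.toNat = 52 ∨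
      c.toNat = 53 ∨ c.toNat = 54 ∨ c.toNat = 55 ∨ c.toNat = 56 ∨ c.toNat = 57 := by omega
  have hc : c = Char.ofNat c.toNat := (Char.ofNat_toNat c).symm
  rcases hd with h|h|h|h|h|h|h|h|h|h <;> rw [hc, h] <;> rfl

-- the digit loop is compositional
theorem canonNumLoop_append (xs ys : List Char) (v : Int) :
    canonNumLoop (xs ++ ys) v = (canonNumLoop xs v).bind (canonNumLoop ys) := by
  induction xs generalizing v with
  | nil => rfl
  | cons c cs ih =>
    simp only [List.cons_append, canonNumLoop]
    split
    · exact ih _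
    · rfl

-- the digit loop evaluates the decimal digits of n
theorem canonNumLoop_toDigits (n : Nat) : ∀ v : Int,
    canonNumLoop (Nat.toDigits 10 n) v = some (v * 10 ^ (Nat.toDigits 10 n).length + n) := by
  induction n using Nat.strong_induction_on with
  | _ n ih =>
    intro v
    by_cases hn : n < 10
    · rw [Nat.toDigits_of_lt_base hn]
      obtain ⟨h0, h9, hv⟩ := digitChar_facts n hn
      simp only [canonNumLoop, hv, List.length_singleton]
      rw [if_pos ⟨h0, h9⟩]
      congr 1
      push_cast
      ring
    · have h10 : (10 : Nat) ≤ n := by omega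
      rw [Nat.toDigits_of_base_le (by norm_num) h10, canonNumLoop_append,
        ih (n / 10) (by omega) v]
      have hd : n % 10 < 10 := Nat.mod_lt _ (by norm_num)
      obtain ⟨h0, h9, hv⟩ := digitChar_facts (n % 10) hd
      simp only [Option.bind_some, canonNumLoop, hv,
        List.length_append, List.length_singleton]
      rw [if_pos ⟨h0, h9⟩]
      congr 1
      rw [pow_succ]
      have hvx : v * (10 ^ (Nat.toDigits 10 (n / 10)).length * 10) =
          v * 10 ^ (Nat.toDigits 10 (n / 10)).length * 10 := by ring
      rw [hvx]
      generalize v * 10 ^ (Nat.toDigits 10 (n / 10)).length = y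
      omega

-- a positive number's decimal form does not start with '0'
theorem toDigits_head_ne_zero : ∀ (n : Nat), 1 ≤ n → ∀ (c : Char) (cs : List Char),
    Nat.toDigits 10 n = c :: cs → c ≠ '0' := by
  intro n
  induction n using Nat.strong_induction_on with
  | _ n ih =>
    intro hn c cs h
    by_cases h10 : n < 10
    · rw [Nat.toDigits_of_lt_base h10] at h
      injection h with h1 _
      subst h1
      interval_cases n <;> simp_all <;> decide
    · rw [Nat.toDigits_of_base_le (by norm_num) (by omega)] at h
      rcases e : Nat.toDigits 10 (n / 10) with _ | ⟨c', cs'⟩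
      · have := @Nat.length_toDigits_pos 10 (n / 10)
        rw [e] at this
        simp at this
      · rw [e] at h
        simp only [List.cons_append] at h
        injection h with h1 _
        subst h1
        exact ih (n / 10) (by omega) (by omega) c' cs' e

-- _canon_num inverts str(·) on naturals
theorem canonNum?_toDigits (n : Nat) : canonNum? (Nat.toDigits 10 n) = some ((n : Int)) := by
  rcases e : Nat.toDigits 10 n with _ | ⟨c, cs⟩
  · have := @Nat.length_toDigits_pos 10 n
    rw [e] at this
    simp at this
  · have hguard : ¬ (c = '0' ∧ cs ≠ []) := by
      rintro ⟨rfl, hcs⟩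
      have hlen : 2 ≤ (Nat.toDigits 10 n).length := by
        rw [e]
        cases cs
        · exact absurd rfl hcs
        · simp
      have hlt : ¬ ((Nat.toDigits 10 n).length ≤ 1) := by omega
      rw [Nat.length_toDigits_le_iff (by norm_num) (by norm_num)] at hlt
      have h10 : (10 : Nat) ≤ n := by simpa using hlt
      exact toDigits_head_ne_zero n (by omega) '0' cs e rfl
    simp only [canonNum?]
    rw [if_neg hguard, ← e, canonNumLoop_toDigits]
    simp

-- _canon_num inverts str(·) on non-negative ints
theorem canonNum?_toChars (m : Int) (hm : 0 ≤ m) :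
    canonNum? (PySem.Int.toChars m) = some m := by
  rw [PySem.Int.toChars, if_neg (by omega)]
  rw [canonNum?_toDigits]
  exact congrArg some (Int.toNat_of_nonneg hm)

-- the digit loop succeeds from 0 only on the decimal digits of its value
theorem canonNumLoop_inv : ∀ (rest : List Char), ∀ m : Int,
    rest ≠ [] → (rest = ['0'] ∨ rest.head? ≠ some '0') →
    canonNumLoop rest 0 = some m → 0 ≤ m ∧ Nat.toDigits 10 m.toNat = rest := by
  intro rest
  induction rest using List.reverseRecOn with
  | nil => intro m h; exact absurd rfl h
  | append_singleton ds c ih =>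
    intro m _ hgood h
    rcases eds : ds with _ | ⟨d0, ds'⟩
    · subst eds
      simp only [List.nil_append] at h hgood ⊢
      rw [canonNumLoop] at h
      split at h
      · rename_i hdig
        rw [canonNumLoop] at h
        have h48 : (48 : Nat) ≤ c.toNat := hdig.1
        have h57 : c.toNat ≤ 57 := hdig.2
        injection h with h1
        have hm0 : 0 ≤ m := by omega
        refine ⟨hm0, ?_⟩
        have hmt : m.toNat = c.toNat - 48 := by omega
        rw [hmt, Nat.toDigits_of_lt_base (by omega), digitChar_of_char c hdig.1 hdig.2]
      · exact absurd h (by simp)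
    · have hds_ne : ds ≠ [] := by rw [eds]; simp
      have hhead : ds.head? ≠ some '0' := by
        rcases hgood with hg | hg
        · exact absurd (congrArg List.length hg) (by rw [eds]; simp)
        · rw [eds] at hg ⊢
          simpa using hg
      rw [canonNumLoop_append] at h
      rcases ev : canonNumLoop ds 0 with _ | v
      · rw [ev] at h
        exact absurd h (by simp)
      · rw [ev] at h
        simp only [Option.bind_some] at h
        obtain ⟨hv0, hvd⟩ := ih v hds_ne (Or.inr hhead) ev
        rw [canonNumLoop] at h
        split at h
        · rename_i hdig
          rw [canonNumLoop] at h
          have h48 : (48 : Nat) ≤ c.toNat := hdig.1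
          have h57 : c.toNat ≤ 57 := hdig.2
          injection h with h1
          have hv1 : 1 ≤ v.toNat := by
            by_contra hv
            have : v.toNat = 0 := by omega
            rw [this, Nat.toDigits_zero] at hvd
            rw [← hvd] at hhead
            simp at hhead
          have hm0 : 0 ≤ m := by omega
          refine ⟨hm0, ?_⟩
          have hmt : m.toNat = 10 * v.toNat + (c.toNat - 48) := by omega
          rw [hmt, ← Nat.toDigits_append_toDigits (by norm_num) (by omega) (by omega),
            hvd, Nat.toDigits_of_lt_base (by omega), digitChar_of_char c hdig.1 hdig.2, eds]
        · exact absurd h (by simp)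

-- _canon_num succeeds ONLY on the canonical decimal form
theorem canonNum?_eq_some (rest : List Char) (m : Int)
    (h : canonNum? rest = some m) : 0 ≤ m ∧ rest = PySem.Int.toChars m := by
  rcases rest with _ | ⟨c, cs⟩
  · exact absurd h (by simp [canonNum?])
  · rw [canonNum?] at h
    split at h
    · exact absurd h (by simp)
    · rename_i hguard
      have hgood : c :: cs = ['0'] ∨ (c :: cs).head? ≠ some '0' := by
        by_cases hc : c = '0'
        · subst hc
          rcases e : cs with _ | _
          · exact Or.inl rfl
          · exact absurd ⟨rfl, by simp [e]⟩ hguard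
        · exact Or.inr (by simpa using hc)
      obtain ⟨hm0, hdig⟩ := canonNumLoop_inv (c :: cs) m (by simp) hgood h
      refine ⟨hm0, ?_⟩
      rw [PySem.Int.toChars, if_neg (by omega), hdig]

-- the extraction step succeeds exactly on titles of the form pre ++ str(m), m ≥ 0 canonical
theorem canonSuffix?_eq_some (pre : List Char) (t : String) (m : Int) :
    canonSuffix? pre t = some m ↔ (0 ≤ m ∧ t.toList = pre ++ PySem.Int.toChars m) := by
  unfold canonSuffix?
  constructor
  · intro h
    split at h
    · rename_i hpre
      obtain ⟨r, hr⟩ := (PySem.Chars.startswith_iff _ _).mp hpre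
      rw [PySem.List.slice_from_natCast] at h
      have hdrop : (t.toList).drop pre.length = r := by
        rw [← hr]; simp
      rw [hdrop] at h
      obtain ⟨hm0, hrm⟩ := canonNum?_eq_some r m h
      exact ⟨hm0, by rw [← hr, hrm]⟩
    · exact absurd h (by simp)
  · rintro ⟨hm0, hl⟩
    have hpre : PySem.Chars.startswith t.toList pre = true :=
      (PySem.Chars.startswith_iff _ _).mpr ⟨PySem.Int.toChars m, hl.symm⟩
    rw [if_pos hpre, PySem.List.slice_from_natCast, hl]
    simp only [List.drop_left]
    exact canonNum?_toChars m hm0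

-- B's accumulation loop is set(filterMap of the extraction step)
theorem foldl_canonSuffix (p : List Char) (l : List String) :
    (l.foldl (fun s t =>
      match canonSuffix? p t with
      | some v => PySem.Set.add s v
      | none => s) PySem.Set.empty) = PySem.Set.ofList (l.filterMap (canonSuffix? p)) := by
  have aux : ∀ (l : List String) (s : PySem.Set Int),
      (l.foldl (fun s t =>
        match canonSuffix? p t with
        | some v => PySem.Set.add s v
        | none => s) s) = PySem.Set.update s (l.filterMap (canonSuffix? p)) := by
    intro l
    induction l with
    | nil => intro s; rfl
    | cons t l ih =>
      intro s
      simp only [List.foldl_cons, List.filterMap_cons]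
      cases h : canonSuffix? p t <;> simp [ih, PySem.Set.update]
  rw [aux]
  rfl

-- membership of a candidate number in B's extracted data ↔ membership of the candidate title
theorem candMem (safe : String) (ex : List String) (m : Int) (hm : 0 ≤ m) :
    (safe ++ "_" ++ PySem.Int.toStr m) ∈ ex ↔
      m ∈ ex.filterMap (canonSuffix? (safe ++ "_").toList) := by
  constructor
  · intro h
    refine List.mem_filterMap.mpr ⟨safe ++ "_" ++ PySem.Int.toStr m, h, ?_⟩
    rw [canonSuffix?_eq_some]
    refine ⟨hm, ?_⟩
    simp [String.toList_append, PySem.Int.toList_toStr]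
  · intro h
    obtain ⟨t, ht, hsome⟩ := List.mem_filterMap.mp h
    obtain ⟨-, htl⟩ := (canonSuffix?_eq_some _ _ _).mp hsome
    have heq : t = safe ++ "_" ++ PySem.Int.toStr m := by
      apply String.toList_inj.mp
      rw [htl]
      simp [String.toList_append, PySem.Int.toList_toStr]
    rwa [heq] at ht

-- A's probe loop: if k is least with candidate free (and fuel suffices), it returns that candidate
theorem loopA_spec (safe : String) (ex : List String) : ∀ (k fuel : Nat) (idx : Int),
    k ≤ fuel →
    (∀ j : Nat, j < k → (safe ++ "_" ++ PySem.Int.toStr (idx + j)) ∈ ex) →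
    (safe ++ "_" ++ PySem.Int.toStr (idx + k)) ∉ ex →
    uniqueTitleLoopA safe ex fuel idx = safe ++ "_" ++ PySem.Int.toStr (idx + k) := by
  intro k
  induction k with
  | zero =>
    intro fuel idx _ _ hfree
    simp only [Nat.cast_zero, add_zero] at hfree ⊢
    cases fuel with
    | zero => rfl
    | succ f =>
      rw [uniqueTitleLoopA]
      simp only [if_neg hfree]
  | succ k ih =>
    intro fuel idx hk hmem hfree
    cases fuel with
    | zero => omega
    | succ f =>
      have hmem' : ∀ j : Nat, j < k → (safe ++ "_" ++ PySem.Int.toStr (idx + 1 + (j : Int))) ∈ ex := by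
        intro j hj
        have hcast : idx + 1 + (j : Int) = idx + ((j + 1 : Nat) : Int) := by push_cast; ring
        rw [hcast]
        exact hmem (j + 1) (by omega)
      have hfree' : (safe ++ "_" ++ PySem.Int.toStr (idx + 1 + (k : Int))) ∉ ex := by
        have hcast : idx + 1 + (k : Int) = idx + ((k + 1 : Nat) : Int) := by push_cast; ring
        rw [hcast]
        exact hfree
      have h0 : (safe ++ "_" ++ PySem.Int.toStr idx) ∈ ex := by
        simpa using hmem 0 (by omega)
      rw [uniqueTitleLoopA]
      simp only [if_pos h0]
      rw [ih f (idx + 1) (by omega) hmem' hfree']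
      congr 2
      push_cast
      ring

-- B's gap scan on a strictly increasing list returns the least free value ≥ idx
theorem gapScan_spec : ∀ (L : List Int), L.Pairwise (· < ·) → ∀ (idx : Int) (k : Nat),
    (∀ j : Nat, j < k → (idx + j) ∈ L) → (idx + (k : Int)) ∉ L →
    gapScan L idx = idx + k := by
  intro L hL
  induction L with
  | nil =>
    intro idx k hmem _
    cases k with
    | zero => simp [gapScan]
    | succ k => exact absurd (hmem 0 (by omega)) (by simp)
  | cons v vs ih =>
    intro idx k hmem hfree
    obtain ⟨hv, hvs⟩ := List.pairwise_cons.mp hL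
    rw [gapScan]
    by_cases h1 : v < idx
    · rw [if_pos h1]
      refine ih hvs idx k (fun j hj => ?_) (fun hmem' => hfree (List.mem_cons_of_mem v hmem'))
      rcases List.mem_cons.mp (hmem j hj) with he | hm
      · exfalso; omega
      · exact hm
    · rw [if_neg h1]
      by_cases h2 : v = idx
      · rw [if_pos h2]
        cases k with
        | zero =>
          exfalso
          apply hfree
          simp only [Nat.cast_zero, add_zero]
          exact List.mem_cons.mpr (Or.inl h2.symm)
        | succ k =>
          have hmem' : ∀ j : Nat, j < k → idx + 1 + (j : Int) ∈ vs := by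
            intro j hj
            have hcast : idx + 1 + (j : Int) = idx + ((j + 1 : Nat) : Int) := by push_cast; ring
            rcases List.mem_cons.mp (hmem (j + 1) (by omega)) with he | hm
            · rw [h2] at he; push_cast at he; omega
            · rwa [hcast]
          have hfree' : idx + 1 + (k : Int) ∉ vs := by
            intro hm
            apply hfree
            have hcast : idx + 1 + (k : Int) = idx + ((k + 1 : Nat) : Int) := by push_cast; ring
            exact List.mem_cons_of_mem _ (hcast ▸ hm)
          rw [ih hvs (idx + 1) k hmem' hfree']
          push_cast
          ring
      · rw [if_neg h2]
        cases k with
        | zero => simp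
        | succ k =>
          have h0 := hmem 0 (by omega)
          simp only [Nat.cast_zero, add_zero] at h0
          rcases List.mem_cons.mp h0 with he | hm
          · exact absurd he (by omega)
          · exact absurd (hv _ hm) (by omega)

-- some probe within the first |ex|+1 candidates is free (pigeonhole)
-- str(·) is injective on the non-negative ints (it has a left inverse, _canon_num)
theorem toStr_inj_nonneg (a b : Int) (ha : 0 ≤ a) (hb : 0 ≤ b)
    (h : PySem.Int.toStr a = PySem.Int.toStr b) : a = b := by
  have h' : PySem.Int.toChars a = PySem.Int.toChars b := by
    have := congrArg String.toList h
    simpa [PySem.Int.toList_toStr] using this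
  have ha' := canonNum?_toChars a ha
  rw [h', canonNum?_toChars b hb] at ha'
  exact (Option.some_inj.mp ha').symm

theorem exists_free (safe : String) (ex : List String) :
    ∃ j : Nat, j ≤ ex.length ∧ (safe ++ "_" ++ PySem.Int.toStr (2 + (j : Int))) ∉ ex := by
  by_contra hc
  push Not at hc
  have hinj : Function.Injective (fun j : Nat => safe ++ "_" ++ PySem.Int.toStr (2 + (j : Int))) := by
    intro a b hab
    simp only at hab
    have h1 : PySem.Int.toStr (2 + (a : Int)) = PySem.Int.toStr (2 + (b : Int)) := by
      have h2 := congrArg String.toList hab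
      simp only [String.toList_append] at h2
      exact String.toList_inj.mp (List.append_cancel_left h2)
    have := toStr_inj_nonneg _ _ (by omega) (by omega) h1
    omega
  have hnodup : ((List.range (ex.length + 1)).map
      (fun j : Nat => safe ++ "_" ++ PySem.Int.toStr (2 + (j : Int)))).Nodup :=
    List.Nodup.map hinj List.nodup_range
  have hsub : ((List.range (ex.length + 1)).map
      (fun j : Nat => safe ++ "_" ++ PySem.Int.toStr (2 + (j : Int)))) ⊆ ex := by
    intro x hx
    obtain ⟨j, hj, rfl⟩ := List.mem_map.mp hx
    exact hc j (Nat.lt_succ_iff.mp (List.mem_range.mp hj))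
  have hlen : ((List.range (ex.length + 1)).map
      (fun j : Nat => safe ++ "_" ++ PySem.Int.toStr (2 + (j : Int)))).length ≤ ex.length := by
    calc ((List.range (ex.length + 1)).map _).length
        = ((List.range (ex.length + 1)).map
            (fun j : Nat => safe ++ "_" ++ PySem.Int.toStr (2 + (j : Int)))).toFinset.card :=
          (List.toFinset_card_of_nodup hnodup).symm
      _ ≤ ex.toFinset.card :=
          Finset.card_le_card (fun x hx => List.mem_toFinset.mpr (hsub (List.mem_toFinset.mp hx)))
      _ ≤ ex.length := ex.toFinset_card_le
  simp [List.length_map, List.length_range] at hlen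

-- the two programs agree on the suffixed branch
theorem branch_eq (safe : String) (ex : List String) :
    uniqueTitleLoopA safe ex (ex.length + 1) 2 =
      safe ++ "_" ++ PySem.Int.toStr (gapScan (PySem.List.sorted
        (ex.foldl (fun s t =>
          match canonSuffix? (safe ++ "_").toList t with
          | some v => PySem.Set.add s v
          | none => s) PySem.Set.empty) (fun x => x)) 2) := by
  obtain ⟨jw, hjw_le, hjw⟩ := exists_free safe ex
  have hex : ∃ k : Nat, (safe ++ "_" ++ PySem.Int.toStr (2 + (k : Int))) ∉ ex := ⟨jw, hjw⟩
  obtain ⟨k₀, hk₀le, hfree, hmin⟩ :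
      ∃ k : Nat, k ≤ ex.length ∧ (safe ++ "_" ++ PySem.Int.toStr (2 + (k : Int))) ∉ ex ∧
        ∀ j : Nat, j < k → (safe ++ "_" ++ PySem.Int.toStr (2 + (j : Int))) ∈ ex :=
    ⟨Nat.find hex, le_trans (Nat.find_min' hex hjw) hjw_le, Nat.find_spec hex,
      fun j hj => not_not.mp (Nat.find_min hex hj)⟩
  rw [loopA_spec safe ex k₀ (ex.length + 1) 2 (by omega) hmin hfree]
  rw [foldl_canonSuffix]
  rw [gapScan_spec _ (PySem.List.sorted_ofList_pairwise_lt _) 2 k₀ ?hm ?hf]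
  case hm =>
    intro j hj
    rw [PySem.List.mem_sorted, PySem.Set.mem_ofList]
    exact (candMem safe ex (2 + (j : Int)) (by omega)).mp (hmin j hj)
  case hf =>
    intro hm
    rw [PySem.List.mem_sorted, PySem.Set.mem_ofList] at hm
    exact hfree ((candMem safe ex (2 + (k₀ : Int)) (by omega)).mpr hm)

-- ===== VERDICT (by name: the statement is the Claim_ definition above) =====
set_option maxHeartbeats 1000000 in
theorem unique_title_spec : Claim_equal_unique_title := by
  intro base ex _
  unfold Spec_unique_title unique_title unique_title_alt
  generalize String.ofList (PySem.List.slice (if base = "" then "Company" else base).toList none (some 100)) = safe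
  by_cases h : safe ∈ ex
  · simp only [if_pos h]
    exact branch_eq safe ex
  · simp only [if_neg h]
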